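-- pv_equiv track=rewrite | github.com/anna-prins/advent-of-code | day_13.py | find_symmetry_helper
-- ===== SOURCE A (Python) =====
-- def find_symmetry_helper( pattern, index_1, index_2 ):
--     if index_1 < 0:
--         return True
--     if index_2 >= len(pattern):
--         return True
--
--     if pattern[index_1] == pattern[index_2]:
--         return find_symmetry_helper( pattern, index_1 - 1, index_2 + 1 )
--     else:
--         return False
-- ===== SOURCE B (Python) =====
-- def find_symmetry_helper(pattern, index_1, index_2):
--     k = min(index_1 + 1, len(pattern) - index_2)
--     return all(pattern[index_1 - t] == pattern[index_2 + t] for t in range(k))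
-- ===== Notes on version B (the rewrite author's own statement) =====
-- stated objective: idiomatic
-- what changed: Replaced the outward-expanding recursion by a closed-form pair count k = min(index_1+1, len-index_2) and a single flat all() over range(k), removing recursion entirely.
import Mathlib
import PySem

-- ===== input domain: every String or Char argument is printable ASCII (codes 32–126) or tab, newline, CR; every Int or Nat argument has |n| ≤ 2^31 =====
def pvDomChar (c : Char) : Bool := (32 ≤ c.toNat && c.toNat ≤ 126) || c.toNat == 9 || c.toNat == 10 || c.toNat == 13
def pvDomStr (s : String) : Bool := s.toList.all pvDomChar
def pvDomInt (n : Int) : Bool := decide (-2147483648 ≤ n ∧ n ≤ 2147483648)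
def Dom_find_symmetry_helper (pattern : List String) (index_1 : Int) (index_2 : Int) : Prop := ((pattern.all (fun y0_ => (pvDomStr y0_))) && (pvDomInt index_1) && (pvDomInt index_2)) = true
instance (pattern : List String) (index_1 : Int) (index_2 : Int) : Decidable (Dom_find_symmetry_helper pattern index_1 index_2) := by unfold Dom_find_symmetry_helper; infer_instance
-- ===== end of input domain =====

-- B replaces the outward-expanding recursion by one all() over zipped index ranges (idiomatic); same values.
-- ===== PORT A =====
def find_symmetry_helper (pattern : List String) (index_1 : Int) (index_2 : Int) : Bool :=
  if index_1 < 0 then true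
  else if index_2 ≥ (pattern.length : Int) then true
  else
    match PySem.List.pyGet? pattern index_1, PySem.List.pyGet? pattern index_2 with
    | some a, some b =>
        if a == b then find_symmetry_helper pattern (index_1 - 1) (index_2 + 1)
        else false
    | _, _ => false  -- IndexError in Python; excluded by Pre_
termination_by ((pattern.length : Int) - index_2).toNat
decreasing_by omega

-- ===== PORT B =====
def find_symmetry_helper_alt (pattern : List String) (index_1 : Int) (index_2 : Int) : Bool :=
  let k : Int := min (index_1 + 1) ((pattern.length : Int) - index_2)
  (PySem.List.pyRange 0 k 1).all
    (fun t => PySem.List.pyGet? pattern (index_1 - t) == PySem.List.pyGet? pattern (index_2 + t))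

-- ===== PRECONDITION & SPEC =====
-- Pre_ excludes exactly the inputs where Python A raises IndexError (index_1 beyond the end,
-- or index_2 below -len, while both guards pass); Python B raises the same IndexError there.
def Pre_find_symmetry_helper (pattern : List String) (index_1 : Int) (index_2 : Int) : Prop :=
  index_1 < 0 ∨ (pattern.length : Int) ≤ index_2 ∨
    (index_1 < (pattern.length : Int) ∧ -(pattern.length : Int) ≤ index_2)
instance (pattern : List String) (index_1 : Int) (index_2 : Int) : Decidable (Pre_find_symmetry_helper pattern index_1 index_2) := by unfold Pre_find_symmetry_helper; infer_instance

def pvWitness_find_symmetry_helper : List String × Int × Int := (["a", "b", "b", "a"], 1, 2)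

def Spec_find_symmetry_helper (pattern : List String) (index_1 : Int) (index_2 : Int) (out : Bool) : Prop := out = find_symmetry_helper_alt pattern index_1 index_2
instance (pattern : List String) (index_1 : Int) (index_2 : Int) (out : Bool) : Decidable (Spec_find_symmetry_helper pattern index_1 index_2 out) := by unfold Spec_find_symmetry_helper; infer_instance

-- ===== CLAIM (what is proved, stated in full; the proofs are below) =====
def Claim_equal_find_symmetry_helper : Prop := ∀ (pattern : List String) (index_1 : Int) (index_2 : Int), Dom_find_symmetry_helper pattern index_1 index_2 → Pre_find_symmetry_helper pattern index_1 index_2 → Spec_find_symmetry_helper pattern index_1 index_2 (find_symmetry_helper pattern index_1 index_2)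

-- ===== LEMMAS AND PROOFS =====
theorem alt_eq_range (pattern : List String) (i1 i2 : Int) :
    find_symmetry_helper_alt pattern i1 i2
      = (List.range (min (i1 + 1) ((pattern.length : Int) - i2)).toNat).all
          (fun t => PySem.List.pyGet? pattern (i1 - t) == PySem.List.pyGet? pattern (i2 + t)) := by
  rw [find_symmetry_helper_alt]
  rw [PySem.List.pyRange_one]
  simp only [List.all_map, sub_zero]
  exact List.all_congr rfl (fun t => by simp)

theorem fsh_main (pattern : List String) (index_1 index_2 : Int)
    (h : Pre_find_symmetry_helper pattern index_1 index_2) :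
    find_symmetry_helper pattern index_1 index_2
      = find_symmetry_helper_alt pattern index_1 index_2 := by
  unfold Pre_find_symmetry_helper at h
  rw [find_symmetry_helper, alt_eq_range]
  by_cases h1 : index_1 < 0
  · have hz : (min (index_1 + 1) ((pattern.length : Int) - index_2)).toNat = 0 := by omega
    simp [h1, hz]
  · by_cases h2 : index_2 ≥ (pattern.length : Int)
    · have hz : (min (index_1 + 1) ((pattern.length : Int) - index_2)).toNat = 0 := by omega
      simp [h1, h2, hz]
    · have hi1 : index_1 < (pattern.length : Int) := by omega
      have hi2 : -(pattern.length : Int) ≤ index_2 := by omega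
      obtain ⟨m, hm⟩ : ∃ m, (min (index_1 + 1) ((pattern.length : Int) - index_2)).toNat = m + 1 := by
        refine ⟨(min (index_1 + 1) ((pattern.length : Int) - index_2)).toNat - 1, ?_⟩
        omega
      have hg1 : ∃ a, PySem.List.pyGet? pattern index_1 = some a := by
        rcases Option.eq_none_or_eq_some (PySem.List.pyGet? pattern index_1) with hn | hs
        · rw [PySem.List.pyGet?_eq_none_iff] at hn
          exact absurd ⟨by omega, by omega⟩ hn
        · exact hs
      have hg2 : ∃ b, PySem.List.pyGet? pattern index_2 = some b := by
        rcases Option.eq_none_or_eq_some (PySem.List.pyGet? pattern index_2) with hn | hs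
        · rw [PySem.List.pyGet?_eq_none_iff] at hn
          exact absurd ⟨by omega, by omega⟩ hn
        · exact hs
      obtain ⟨a, ha⟩ := hg1
      obtain ⟨b, hb⟩ := hg2
      rw [hm, List.range_succ_eq_map]
      simp only [h1, h2, if_false, List.all_cons, List.all_map, ha, hb,
        Int.natCast_zero, sub_zero, add_zero]
      by_cases hab : a == b
      · have hrec := fsh_main pattern (index_1 - 1) (index_2 + 1)
          (Or.inr (Or.inr ⟨by omega, by omega⟩))
        rw [alt_eq_range] at hrec
        have hm' : (min (index_1 - 1 + 1) ((pattern.length : Int) - (index_2 + 1))).toNat = m := by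
          omega
        rw [hm'] at hrec
        rw [hrec]
        have hsb : (some a == some b) = true := by simp [hab]
        rw [if_pos hab, hsb, Bool.true_and]
        refine List.all_congr rfl (fun t => ?_)
        have e1 : index_1 - 1 - (t : Int) = index_1 - ((t.succ : Nat) : Int) := by push_cast; ring
        have e2 : index_2 + 1 + (t : Int) = index_2 + ((t.succ : Nat) : Int) := by push_cast; ring
        simp only [Function.comp_apply, e1, e2]
      · simp [hab]
termination_by ((pattern.length : Int) - index_2).toNat
decreasing_by omega

-- ===== VERDICT (by name: the statement is the Claim_ definition above) =====
theorem find_symmetry_helper_spec : Claim_equal_find_symmetry_helper := by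
  intro pattern i1 i2 _ hpre
  exact fsh_main pattern i1 i2 hpre
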